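-- pv_equiv track=rewrite | github.com/Sologa/NLP_PRISMA_Reviews | scripts/lib/bib_parser.py | _split_concat_parts
-- ===== SOURCE A (Python) =====
-- from typing import Dict, List, Tuple
--
-- def _is_escaped(text: str, idx: int) -> bool:
--     """Return True when text[idx] is escaped by an odd number of backslashes."""
--     backslashes = 0
--     j = idx - 1
--     while j >= 0 and text[j] == "\\":
--         backslashes += 1
--         j -= 1
--     return (backslashes % 2) == 1
--
-- def _split_concat_parts(expr: str) -> List[str]:
--     parts: List[str] = []
--     buf: List[str] = []
--     depth = 0
--     in_quote = False
--     escape = False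
--     for idx, ch in enumerate(expr):
--         if in_quote:
--             buf.append(ch)
--             if escape:
--                 escape = False
--             elif ch == "\\":
--                 escape = True
--             elif ch == '"':
--                 in_quote = False
--             continue
--
--         if ch == '"' and not _is_escaped(expr, idx):
--             in_quote = True
--             buf.append(ch)
--             continue
--         if ch == "{":
--             depth += 1
--             buf.append(ch)
--             continue
--         if ch == "}" and depth > 0:
--             depth -= 1
--             buf.append(ch)
--             continue
--         if ch == "#" and depth == 0:
--             part = "".join(buf).strip()
--             if part:
--                 parts.append(part)
--             buf = []
--             continue
--         buf.append(ch)
--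
--     part = "".join(buf).strip()
--     if part:
--         parts.append(part)
--     return parts
-- ===== SOURCE B (Python) =====
-- from typing import List
--
-- def _is_escaped(text: str, idx: int) -> bool:
--     backslashes = 0
--     j = idx - 1
--     while j >= 0 and text[j] == "\\":
--         backslashes += 1
--         j -= 1
--     return (backslashes % 2) == 1
--
-- def _split_concat_parts(expr: str) -> List[str]:
--     # pass 1: collect the indices of top-level '#' delimiters (no char buffer)
--     cuts: List[int] = []
--     depth = 0
--     in_quote = False
--     escape = False
--     for idx, ch in enumerate(expr):
--         if in_quote:
--             if escape:
--                 escape = False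
--             elif ch == "\\":
--                 escape = True
--             elif ch == '"':
--                 in_quote = False
--         elif ch == '"' and not _is_escaped(expr, idx):
--             in_quote = True
--         elif ch == "{":
--             depth += 1
--         elif ch == "}" and depth > 0:
--             depth -= 1
--         elif ch == "#" and depth == 0:
--             cuts.append(idx)
--     # pass 2: slice between boundaries, strip, keep non-empty
--     parts: List[str] = []
--     start = 0
--     for cut in cuts + [len(expr)]:
--         part = expr[start:cut].strip()
--         if part:
--             parts.append(part)
--         start = cut + 1
--     return parts
-- ===== Notes on version B (the rewrite author's own statement) =====
-- stated objective: alternative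
-- what changed: B replaces A's character-by-character buffer accumulation with a first pass that only records the indices of the top-level hash delimiters and a second pass that slices the string between those boundaries, strips each slice and keeps the non-empty ones.
import Mathlib
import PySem

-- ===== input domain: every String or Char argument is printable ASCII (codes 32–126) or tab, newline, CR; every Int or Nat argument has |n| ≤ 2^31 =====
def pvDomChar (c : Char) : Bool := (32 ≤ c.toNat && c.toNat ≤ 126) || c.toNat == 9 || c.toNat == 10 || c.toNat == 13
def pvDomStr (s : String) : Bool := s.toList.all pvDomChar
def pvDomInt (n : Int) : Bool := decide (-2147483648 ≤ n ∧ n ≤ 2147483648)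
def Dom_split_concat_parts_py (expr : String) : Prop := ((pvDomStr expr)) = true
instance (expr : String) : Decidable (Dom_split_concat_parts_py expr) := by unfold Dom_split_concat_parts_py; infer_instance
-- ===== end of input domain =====

-- B replaces A's character-by-character buffer accumulation with a first pass that only records
-- the indices of top-level hash delimiters and a second pass that slices the string between
-- boundaries (objective: alternative decomposition, same cost).

-- ===== PORT A =====
-- _is_escaped: the while loop counting backslashes before idx, as structural recursion on idx
def pvCountBS (text : List Char) : Nat → Nat
  | 0 => 0
  | j + 1 => if text[j]? = some '\\' then pvCountBS text j + 1 else 0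

def pvIsEscaped (text : List Char) (idx : Nat) : Bool := pvCountBS text idx % 2 == 1

-- the for-loop of A: state (idx, depth, in_quote, escape, buf, parts)
def pvLoopA (text : List Char) : List Char → Nat → Int → Bool → Bool → List Char → List String → List String
  | [], _, _, _, _, buf, parts =>
      let part := PySem.Chars.strip buf
      if part = [] then parts else parts ++ [String.ofList part]
  | ch :: rest, idx, depth, inq, esc, buf, parts =>
      if inq then
        let buf' := buf ++ [ch]
        if esc then pvLoopA text rest (idx + 1) depth true false buf' parts
        else if ch = '\\' then pvLoopA text rest (idx + 1) depth true true buf' parts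
        else if ch = '"' then pvLoopA text rest (idx + 1) depth false esc buf' parts
        else pvLoopA text rest (idx + 1) depth true esc buf' parts
      else if ch = '"' ∧ pvIsEscaped text idx = false then
        pvLoopA text rest (idx + 1) depth true esc (buf ++ [ch]) parts
      else if ch = '{' then
        pvLoopA text rest (idx + 1) (depth + 1) inq esc (buf ++ [ch]) parts
      else if ch = '}' ∧ depth > 0 then
        pvLoopA text rest (idx + 1) (depth - 1) inq esc (buf ++ [ch]) parts
      else if ch = '#' ∧ depth = 0 then
        let part := PySem.Chars.strip buf
        pvLoopA text rest (idx + 1) depth inq esc []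
          (if part = [] then parts else parts ++ [String.ofList part])
      else
        pvLoopA text rest (idx + 1) depth inq esc (buf ++ [ch]) parts

def split_concat_parts_py (expr : String) : List String :=
  pvLoopA expr.toList expr.toList 0 0 false false [] []

-- ===== PORT B =====
-- pass 1 of B: the same state machine, but only the indices of top-level hash delimiters are collected
def pvLoopB (text : List Char) : List Char → Nat → Int → Bool → Bool → List Nat → List Nat
  | [], _, _, _, _, cuts => cuts
  | ch :: rest, idx, depth, inq, esc, cuts =>
      if inq then
        if esc then pvLoopB text rest (idx + 1) depth true false cuts
        else if ch = '\\' then pvLoopB text rest (idx + 1) depth true true cuts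
        else if ch = '"' then pvLoopB text rest (idx + 1) depth false esc cuts
        else pvLoopB text rest (idx + 1) depth true esc cuts
      else if ch = '"' ∧ pvIsEscaped text idx = false then
        pvLoopB text rest (idx + 1) depth true esc cuts
      else if ch = '{' then
        pvLoopB text rest (idx + 1) (depth + 1) inq esc cuts
      else if ch = '}' ∧ depth > 0 then
        pvLoopB text rest (idx + 1) (depth - 1) inq esc cuts
      else if ch = '#' ∧ depth = 0 then
        pvLoopB text rest (idx + 1) depth inq esc (cuts ++ [idx])
      else
        pvLoopB text rest (idx + 1) depth inq esc cuts

-- pass 2 of B: for cut in cuts + [len(expr)]: slice between boundaries, strip, keep non-empty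
def pvEmitB (text : List Char) : List Nat → Nat → List String → List String
  | [], _, out => out
  | cut :: cs, start, out =>
      let part := PySem.Chars.strip (PySem.List.slice text (some (start : Int)) (some (cut : Int)))
      pvEmitB text cs (cut + 1) (if part = [] then out else out ++ [String.ofList part])

def split_concat_parts_py_alt (expr : String) : List String :=
  pvEmitB expr.toList (pvLoopB expr.toList expr.toList 0 0 false false [] ++ [expr.toList.length]) 0 []

-- ===== PRECONDITION & SPEC =====
def Spec_split_concat_parts_py (expr : String) (out : List String) : Prop := out = split_concat_parts_py_alt expr
instance (expr : String) (out : List String) : Decidable (Spec_split_concat_parts_py expr out) := by unfold Spec_split_concat_parts_py; infer_instance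

-- ===== CLAIM (what is proved, stated in full; the proofs are below) =====
def Claim_equal_split_concat_parts_py : Prop := ∀ (expr : String), Dom_split_concat_parts_py expr → Spec_split_concat_parts_py expr (split_concat_parts_py expr)

-- ===== LEMMAS AND PROOFS =====

-- pass 1 of B only ever appends to `cuts`: pull the accumulator out front
theorem pvLoopB_acc (text : List Char) (rest : List Char) (idx : Nat) (depth : Int)
    (inq esc : Bool) (cuts : List Nat) :
    pvLoopB text rest idx depth inq esc cuts = cuts ++ pvLoopB text rest idx depth inq esc [] := by
  induction rest generalizing idx depth inq esc cuts with
  | nil => simp [pvLoopB]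
  | cons ch rest ih =>
    simp only [pvLoopB]
    split_ifs <;> rw [ih] <;>
      try rw [ih (cuts := [] ++ [idx])] <;> try simp

-- pass 2 of B only ever appends to `out`: pull the accumulator out front
theorem pvEmitB_acc (text : List Char) (cs : List Nat) (start : Nat) (out : List String) :
    pvEmitB text cs start out = out ++ pvEmitB text cs start [] := by
  induction cs generalizing start out with
  | nil => simp [pvEmitB]
  | cons cut cs ih =>
    simp only [pvEmitB]
    rw [ih, ih (out := if _ = [] then [] else [] ++ [_])]
    split <;> simp

-- Invariant tying the two scans together: when A's loop runs on the suffix text[idx:] with its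
-- buffer holding exactly text[start:idx] (start = position after the last top-level hash delimiter),
-- its result is `parts` followed by what B's pass 2 emits from B's cut indices for that suffix.
theorem pv_main (text : List Char) (rest : List Char) (idx : Nat) (depth : Int)
    (inq esc : Bool) (start : Nat) (parts : List String)
    (hs : start ≤ idx) (hr : text.drop idx = rest) :
    pvLoopA text rest idx depth inq esc ((text.take idx).drop start) parts
      = parts ++ pvEmitB text (pvLoopB text rest idx depth inq esc [] ++ [text.length]) start [] := by
  induction rest generalizing idx depth inq esc start parts with
  | nil =>
    have hlen : text.length ≤ idx := by
      by_contra h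
      have := List.drop_eq_nil_iff.mp hr
      omega
    have htake : text.take idx = text := List.take_of_length_le hlen
    have hslice : PySem.List.slice text (some (start : Int)) (some ((text.length : Nat) : Int))
        = (text.take idx).drop start := by
      rw [PySem.List.slice_natCast, htake]
      rw [List.take_of_length_le (by simp)]
    simp only [pvLoopA, pvLoopB, List.nil_append, pvEmitB, hslice]
    split <;> simp
  | cons ch rest ih =>
    have hidx : idx < text.length := by
      by_contra h
      rw [List.drop_eq_nil_of_le (by omega)] at hr
      exact (List.cons_ne_nil ch rest) hr.symm
    have hget : text[idx]? = some ch := by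
      have h0 : (text.drop idx)[0]? = some ch := by rw [hr]; rfl
      rwa [List.getElem?_drop, Nat.add_zero] at h0
    have hext : ∀ s, s ≤ idx → (text.take (idx + 1)).drop s = (text.take idx).drop s ++ [ch] := by
      intro s hsle
      rw [List.take_succ, hget]
      simp only [Option.toList_some]
      rw [List.drop_append_of_le_length (by simp; omega)]
    have hrest : text.drop (idx + 1) = rest := by
      have h1 : text.drop (idx + 1) = (text.drop idx).drop 1 := by rw [List.drop_drop]
      rw [h1, hr]; rfl
    have hnil : (text.take (idx + 1)).drop (idx + 1) = [] :=
      List.drop_eq_nil_of_le (by simp)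
    have hslice : PySem.List.slice text (some (start : Int)) (some ((idx : Nat) : Int))
        = (text.take idx).drop start := by
      rw [PySem.List.slice_natCast, List.drop_take]
    simp only [pvLoopA, pvLoopB]
    split_ifs <;>
      first
      | (rw [← hext start hs]; exact ih _ _ _ _ _ _ (by omega) hrest)
      | (rw [pvLoopB_acc text rest (idx + 1) depth inq esc ([] ++ [idx])]
         simp only [List.nil_append, List.cons_append]
         simp only [pvEmitB, hslice]
         rw [pvEmitB_acc]
         have h2 := ih (idx + 1) depth inq esc (idx + 1) parts (le_refl _) hrest
         have h3 := ih (idx + 1) depth inq esc (idx + 1)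
           (parts ++ [String.ofList (PySem.Chars.strip (List.drop start (List.take idx text)))])
           (le_refl _) hrest
         rw [hnil] at h2 h3
         clear ih
         simp_all)

-- ===== VERDICT (by name: the statement is the Claim_ definition above) =====
theorem split_concat_parts_py_spec : Claim_equal_split_concat_parts_py := by
  intro expr _
  unfold Spec_split_concat_parts_py split_concat_parts_py split_concat_parts_py_alt
  simpa using pv_main expr.toList expr.toList 0 0 false false 0 [] (le_refl 0) rfl
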